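-- pv_equiv track=rewrite | github.com/xian-wllm/Bachelor-Project | main/visibility/usefulFunction.py | generate_last_symmetry_group_decimal
-- ===== SOURCE A (Python) =====
-- def generate_cyclic_permutations(binary_string):
--     permutations = []
--     for i in range(len(binary_string)):
--         rotated_binary = binary_string[i:] + binary_string[:i]
--         permutations.append(rotated_binary)
--     return permutations
--
-- def binary_to_decimal(binary_string):
--     return int(binary_string, 2)
--
-- def generate_last_symmetry_group_decimal(n):
--     def generate_combinations(prefix, length):
--         if length == 0:
--             return [prefix]
--         combinations = []
--         for bit in ['0', '1']:
--             combinations.extend(generate_combinations(prefix + bit, length - 1))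
--         return combinations
--
--     last_group = []
--     for length in range(1, n + 1):
--         combinations = generate_combinations('', length)
--         grouped_combinations = {}
--         for combination in combinations:
--             cyclic_permutations = generate_cyclic_permutations(combination)
--             key = tuple(sorted(cyclic_permutations))
--             if key not in grouped_combinations:
--                 grouped_combinations[key] = []
--             grouped_combinations[key].append(combination)
--         last_group = list(grouped_combinations.values())
--
--     # convertir les nombres binaires en décimal et filtrer les groupes avec plus d'un élément
--     last_group_decimal = []
--     for group in last_group:
--         if len(group) > 1:
--             decimal_group = [binary_to_decimal(num) for num in group]
--             last_group_decimal.append(decimal_group)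
--
--     return last_group_decimal
-- ===== SOURCE B (Python) =====
-- def generate_last_symmetry_group_decimal(n):
--     # build all length-n binary strings iteratively, in lexicographic order
--     strings = ['']
--     for _ in range(n):
--         strings = [s + b for s in strings for b in '01']
--     result = []
--     seen = set()
--     for s in strings:
--         if s in seen:
--             continue
--         orbit = sorted({s[j:] + s[:j] for j in range(n)})
--         seen.update(orbit)
--         if len(orbit) > 1:
--             result.append([int(t, 2) for t in orbit])
--     return result
-- ===== Notes on version B (the rewrite author's own statement) =====
-- stated objective: alternative
-- what changed: A enumerates every binary string of the given length recursively and groups them in a dict keyed by the sorted tuple of each string's cyclic rotations (sorting the rotations of every single string), then filters the dict's groups; B instead makes one scan with a visited set: it builds each cyclic orbit only once, at its lexicographically smallest representative, marks the whole orbit visited, and emits multi-member orbits directly, so the per-string key construction and the dict disappear.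
import Mathlib
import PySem

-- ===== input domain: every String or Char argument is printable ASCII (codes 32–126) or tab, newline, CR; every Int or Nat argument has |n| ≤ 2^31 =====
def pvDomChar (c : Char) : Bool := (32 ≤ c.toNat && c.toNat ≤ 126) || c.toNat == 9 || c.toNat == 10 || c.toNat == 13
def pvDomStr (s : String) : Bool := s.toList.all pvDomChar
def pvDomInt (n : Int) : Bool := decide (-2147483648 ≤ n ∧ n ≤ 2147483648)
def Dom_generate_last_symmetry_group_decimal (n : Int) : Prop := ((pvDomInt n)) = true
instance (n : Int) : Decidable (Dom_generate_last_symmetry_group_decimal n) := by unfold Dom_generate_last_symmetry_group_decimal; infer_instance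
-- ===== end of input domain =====

-- B replaces A's per-string dict grouping (sorted-rotation-tuple keys) by a single visited-set
-- scan that builds each cyclic orbit once at its first representative; same return value.


-- ===== PORT A =====
-- Python strings are ported as their List Char code points throughout (PySem.Chars convention).
def pvRotationsA (s : List Char) : List (List Char) :=
  (PySem.List.pyRange 0 (PySem.List.len s) 1).foldl
    (fun perms i =>
      perms ++ [PySem.List.slice s (some i) none ++ PySem.List.slice s none (some i)]) []

-- int(s, 2); total form — A only ever applies it to nonempty '0'/'1' strings, where it is exact
def pvBinToDecA (s : List Char) : Int := (PySem.Int.ofCharsBase? s 2).getD 0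

-- the inner recursive generate_combinations; the loop over the literal list ['0','1'] is unrolled
def pvGenCombA (pre : List Char) (len : Nat) : List (List Char) :=
  match len with
  | 0 => [pre]
  | l + 1 => ([] ++ pvGenCombA (pre ++ ['0']) l) ++ pvGenCombA (pre ++ ['1']) l

def generate_last_symmetry_group_decimal (n : Int) : List (List Int) :=
  let last_group : List (List (List Char)) :=
    (PySem.List.pyRange 1 (n + 1) 1).foldl
      (fun _ len =>
        let combos := pvGenCombA [] len.toNat
        let grouped : PySem.Dict (List (List Char)) (List (List Char)) :=
          combos.foldl
            (fun d c =>
              let key := PySem.List.sorted (pvRotationsA c) (fun x => x)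
              let d := if d.contains key then d else d.insert key []
              d.modify key [] (fun g => g ++ [c]))
            PySem.Dict.empty
        grouped.values)
      []
  last_group.foldl
    (fun acc g => if 1 < g.length then acc ++ [g.map pvBinToDecA] else acc) []

-- ===== PORT B =====
-- int(s, 2); total form — B only ever applies it to nonempty '0'/'1' strings, where it is exact
def pvBinToDecB (s : List Char) : Int := (PySem.Int.ofCharsBase? s 2).getD 0

def generate_last_symmetry_group_decimal_alt (n : Int) : List (List Int) :=
  let strings : List (List Char) :=
    (PySem.List.pyRange 0 n 1).foldl
      (fun strs _ => strs.flatMap (fun s => ['0', '1'].map (fun b => s ++ [b]))) [[]]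
  (strings.foldl
    (fun st s =>
      if PySem.Set.contains st.1 s then st
      else
        let orbit := PySem.List.sorted
          (PySem.Set.ofList ((PySem.List.pyRange 0 n 1).map
            (fun j => PySem.List.slice s (some j) none ++ PySem.List.slice s none (some j))))
          (fun x => x)
        let seen := PySem.Set.update st.1 orbit
        if 1 < orbit.length then (seen, st.2 ++ [orbit.map pvBinToDecB]) else (seen, st.2))
    ((PySem.Set.empty : PySem.Set (List Char)), ([] : List (List Int)))).2

-- ===== PRECONDITION & SPEC =====
def Spec_generate_last_symmetry_group_decimal (n : Int) (out : List (List Int)) : Prop := out = generate_last_symmetry_group_decimal_alt n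
instance (n : Int) (out : List (List Int)) : Decidable (Spec_generate_last_symmetry_group_decimal n out) := by unfold Spec_generate_last_symmetry_group_decimal; infer_instance

-- ===== CLAIM (what is proved, stated in full; the proofs are below) =====
def Claim_equal_generate_last_symmetry_group_decimal : Prop := ∀ (n : Int), Dom_generate_last_symmetry_group_decimal n → Spec_generate_last_symmetry_group_decimal n (generate_last_symmetry_group_decimal n)

-- ===== LEMMAS AND PROOFS =====

-- proof-side normal forms
def pvRots (s : List Char) : List (List Char) :=
  (List.range s.length).map (fun j => List.drop j s ++ List.take j s)

def pvKey (s : List Char) : List (List Char) := PySem.List.sorted (pvRots s) (fun x => x)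

def pvG (s : List Char) : List (List Char) :=
  PySem.List.sorted (PySem.Set.ofList (pvRots s)) (fun x => x)

def pvBin (s : List Char) : Prop := ∀ c ∈ s, c = '0' ∨ c = '1'

def pvFirsts : List (List Char) → List (List (List Char)) → List (List Char)
  | [], _ => []
  | c :: t, ks => if pvKey c ∈ ks then pvFirsts t ks else c :: pvFirsts t (ks ++ [pvKey c])

def pvOut (reps : List (List Char)) : List (List Int) :=
  (reps.filter (fun s => decide (1 < (pvG s).length))).map (fun s => (pvG s).map pvBinToDecA)

def pvScan (n : Int) : List (List Char) → PySem.Set (List Char) → List (List Int)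
  | [], _ => []
  | s :: t, seen =>
    if PySem.Set.contains seen s then pvScan n t seen
    else
      let orbit := PySem.List.sorted
        (PySem.Set.ofList ((PySem.List.pyRange 0 n 1).map
          (fun j => PySem.List.slice s (some j) none ++ PySem.List.slice s none (some j))))
        (fun x => x)
      (if 1 < orbit.length then [orbit.map pvBinToDecB] else []) ++
        pvScan n t (PySem.Set.update seen orbit)

-- the elaborated DecidableLT instance on List Char vs the LinearOrder one
theorem pv_inst_eq :
    (fun (a b : List Char) => a.decidableLT b) =
    (inferInstance : LinearOrder (List Char)).toDecidableLT := by
  funext a b; exact Subsingleton.elim _ _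

theorem pv_lex_mid (p : List Char) (x y : Char) (u v : List Char) (h : x < y) :
    p ++ x :: u < p ++ y :: v := by
  induction p with
  | nil => exact List.Lex.rel h
  | cons c p ih => exact List.Lex.cons ih

theorem pv_genComb_mem (k : Nat) (p s : List Char) :
    s ∈ pvGenCombA p k ↔ ∃ t, s = p ++ t ∧ t.length = k ∧ pvBin t := by
  induction k generalizing p with
  | zero =>
    simp only [pvGenCombA, List.mem_singleton]
    constructor
    · rintro rfl; exact ⟨[], by simp, by simp, by intro c hc; simp at hc⟩
    · rintro ⟨t, rfl, ht, _⟩; simp [List.eq_nil_of_length_eq_zero ht]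
  | succ l ih =>
    simp only [pvGenCombA, List.nil_append, List.mem_append, ih]
    constructor
    · rintro (⟨t, rfl, ht, hb⟩ | ⟨t, rfl, ht, hb⟩)
      · refine ⟨'0' :: t, by simp, by simp [ht], ?_⟩
        rintro c (_ | hc)
        · exact Or.inl rfl
        · exact hb c (by assumption)
      · refine ⟨'1' :: t, by simp, by simp [ht], ?_⟩
        rintro c (_ | hc)
        · exact Or.inr rfl
        · exact hb c (by assumption)
    · rintro ⟨t, rfl, ht, hb⟩
      match t, ht with
      | c :: t, ht =>
        rcases hb c (by simp) with rfl | rfl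
        · exact Or.inl ⟨t, by simp, by simpa using ht, fun d hd => hb d (by simp [hd])⟩
        · exact Or.inr ⟨t, by simp, by simpa using ht, fun d hd => hb d (by simp [hd])⟩

theorem pv_genComb_step (k : Nat) (p : List Char) :
    pvGenCombA p (k + 1) = (pvGenCombA p k).flatMap (fun s => [s ++ ['0'], s ++ ['1']]) := by
  induction k generalizing p with
  | zero => simp [pvGenCombA]
  | succ l ih =>
    show ([] ++ pvGenCombA (p ++ ['0']) (l+1)) ++ pvGenCombA (p ++ ['1']) (l+1) = _
    rw [List.nil_append, ih, ih]
    rw [← List.flatMap_append]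
    rfl

theorem pv_genComb_pairwise (k : Nat) (p : List Char) :
    (pvGenCombA p k).Pairwise (· < ·) := by
  induction k generalizing p with
  | zero => simp [pvGenCombA]
  | succ l ih =>
    simp only [pvGenCombA, List.nil_append]
    rw [List.pairwise_append]
    refine ⟨ih _, ih _, ?_⟩
    intro x hx y hy
    rw [pv_genComb_mem] at hx hy
    obtain ⟨t, rfl, -, -⟩ := hx
    obtain ⟨u, rfl, -, -⟩ := hy
    rw [List.append_assoc, List.append_assoc]
    exact pv_lex_mid p '0' '1' t u (by decide)

theorem pv_altStrings (k : Nat) :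
    (PySem.List.pyRange 0 (k : Int) 1).foldl
      (fun strs _ => strs.flatMap (fun s => ['0', '1'].map (fun b => s ++ [b]))) [[]] =
    pvGenCombA [] k := by
  induction k with
  | zero => simp [PySem.List.pyRange_one_eq_nil, pvGenCombA]
  | succ l ih =>
    have : ((l + 1 : Nat) : Int) = (l : Int) + 1 := by push_cast; ring
    rw [this, PySem.List.pyRange_one_succ_right (by positivity), List.foldl_append, ih]
    rw [pv_genComb_step]
    simp [List.foldl]

theorem pv_rotsA_eq (s : List Char) : pvRotationsA s = pvRots s := by
  rw [pvRotationsA, PySem.List.foldl_append_singleton_eq_map, PySem.List.pyRange_one]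
  simp [pvRots, List.map_map, PySem.List.len_eq, Function.comp_def,
    PySem.List.slice_from_natCast, PySem.List.slice_to_natCast]

theorem pv_orbitB_eq (s : List Char) (n : Int) (h : (s.length : Int) = n) :
    (PySem.List.pyRange 0 n 1).map
      (fun j => PySem.List.slice s (some j) none ++ PySem.List.slice s none (some j)) =
    pvRots s := by
  subst h
  rw [PySem.List.pyRange_one]
  simp [pvRots, List.map_map, Function.comp_def,
    PySem.List.slice_from_natCast, PySem.List.slice_to_natCast]

theorem pv_rots_eq_cyclic (s : List Char) (h : s ≠ []) : pvRots s = s.cyclicPermutations := by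
  apply List.ext_getElem
  · simp [pvRots, List.length_cyclicPermutations_of_ne_nil s h]
  · intro j h1 h2
    simp only [pvRots, List.getElem_map, List.getElem_range, List.getElem_cyclicPermutations]
    rw [List.rotate_eq_drop_append_take]
    simp [pvRots] at h1; omega

theorem pv_mem_rots_iff (s t : List Char) (h : s ≠ []) : t ∈ pvRots s ↔ t ~r s := by
  rw [pv_rots_eq_cyclic s h, List.mem_cyclicPermutations_iff]

theorem pv_key_rot (s t : List Char) (h : s ≠ []) (hr : t ~r s) : pvKey t = pvKey s := by
  have ht : t ≠ [] := by
    intro he; subst he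
    exact h (List.eq_nil_of_length_eq_zero (by simpa using hr.perm.length_eq.symm))
  obtain ⟨m, hm⟩ := hr
  unfold pvKey
  rw [pv_rots_eq_cyclic s h, pv_rots_eq_cyclic t ht]
  rw [show ((fun (a b : List Char) => a.decidableLT b) : DecidableLT (List Char)) = _ from pv_inst_eq]
  apply PySem.List.sorted_eq_sorted_of_perm _ _ _ (fun a b hab => hab)
  rw [← hm, List.cyclicPermutations_rotate]
  exact (List.rotate_perm _ _).symm

theorem pv_key_eq_iff (s t : List Char) (hs : s ≠ []) (ht : t ≠ []) :
    (pvKey t = pvKey s ↔ t ~r s) := by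
  constructor
  · intro hkey
    have h1 : t ∈ pvRots t := by
      have : t ∈ pvRots t ↔ t ~r t := pv_mem_rots_iff t t ht
      exact this.mpr (List.IsRotated.refl t)
    have h2 : t ∈ pvKey t := by
      unfold pvKey; rw [PySem.List.mem_sorted]; exact h1
    rw [hkey] at h2
    unfold pvKey at h2; rw [PySem.List.mem_sorted] at h2
    exact (pv_mem_rots_iff s t hs).mp h2
  · exact pv_key_rot s t hs

theorem pv_mem_C_ne_nil (k : Nat) (hk : 0 < k) (s : List Char) (hs : s ∈ pvGenCombA [] k) : s ≠ [] := by
  obtain ⟨t, hst, ht, -⟩ := (pv_genComb_mem k [] s).mp hs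
  intro he
  rw [he] at hst
  have h0 : t = [] := by simpa using hst.symm
  rw [h0] at ht; simp at ht; omega

theorem pv_filter_eq_pvG (k : Nat) (hk : 0 < k) (s : List Char) (hs : s ∈ pvGenCombA [] k) :
    (pvGenCombA [] k).filter (fun c => pvKey c == pvKey s) = pvG s := by
  have hsne : s ≠ [] := pv_mem_C_ne_nil k hk s hs
  obtain ⟨ts, hts, hlen, hbin⟩ := (pv_genComb_mem k [] s).mp hs
  rw [List.nil_append] at hts; subst hts
  have hmem : ∀ c, c ∈ (pvGenCombA [] k).filter (fun c => pvKey c == pvKey s) ↔ c ~r s := by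
    intro c
    rw [List.mem_filter, beq_iff_eq]
    constructor
    · rintro ⟨hc, hkey⟩
      exact (pv_key_eq_iff s c hsne (pv_mem_C_ne_nil k hk c hc)).mp hkey
    · intro hr
      have hlc : c.length = k := by rw [hr.perm.length_eq]; exact hlen
      have hbc : pvBin c := fun d hd => hbin d (hr.perm.mem_iff.mp hd)
      refine ⟨(pv_genComb_mem k [] c).mpr ⟨c, by simp, hlc, hbc⟩, ?_⟩
      exact (pv_key_eq_iff s c hsne (by intro he; rw [he] at hlc; simp at hlc; omega)).mpr hr
  have hnd : ((pvGenCombA [] k).filter (fun c => pvKey c == pvKey s)).Nodup :=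
    ((pv_genComb_pairwise k []).filter _).imp ne_of_lt
  have hperm : ((pvGenCombA [] k).filter (fun c => pvKey c == pvKey s)).Perm
      (PySem.Set.ofList (pvRots s)) := by
    apply List.perm_of_nodup_nodup_toFinset_eq hnd (PySem.Set.nodup_ofList _)
    ext c
    simp only [List.mem_toFinset, hmem, PySem.Set.mem_ofList, pv_mem_rots_iff s c hsne]
  unfold pvG
  rw [show ((fun (a b : List Char) => a.decidableLT b) : DecidableLT (List Char)) = _ from pv_inst_eq]
  exact (PySem.List.sorted_eq_of_perm_of_pairwise_lt _ _ _ hperm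
    (((pv_genComb_pairwise k []).filter _) )).symm

theorem pv_step_modify {κ : Type} [BEq κ] [LawfulBEq κ] {β : Type}
    (d : PySem.Dict κ (List β)) (k : κ) (f : List β → List β) :
    ((if d.contains k then d else d.insert k []).modify k [] f) = d.modify k [] f := by
  by_cases h : d.contains k
  · simp [h]
  · simp only [h, Bool.false_eq_true, if_false]
    unfold PySem.Dict.modify
    rw [PySem.Dict.getD_insert_self, PySem.Dict.insert_insert_self]
    congr 1
    rw [PySem.Dict.getD_of_get?_eq_none]
    rw [PySem.Dict.get?_eq_none_iff_contains]
    simpa using h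

theorem pv_grouped_values (k : Nat) :
    ((pvGenCombA [] k).foldl
      (fun d c =>
        let key := PySem.List.sorted (pvRotationsA c) (fun x => x)
        let d := if d.contains key then d else d.insert key []
        d.modify key [] (fun g => g ++ [c]))
      (PySem.Dict.empty : PySem.Dict (List (List Char)) (List (List Char)))).values =
    (PySem.Set.ofList ((pvGenCombA [] k).map pvKey)).map
      (fun key => (pvGenCombA [] k).filter (fun c => pvKey c == key)) := by
  have hbody : (fun (d : PySem.Dict (List (List Char)) (List (List Char))) c =>
      let key := PySem.List.sorted (pvRotationsA c) (fun x => x)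
      let d := if d.contains key then d else d.insert key []
      d.modify key [] (fun g => g ++ [c])) =
      (fun d c => d.modify (pvKey c) [] (fun g => g ++ [c])) := by
    funext d c
    simp only [pv_rotsA_eq]
    exact pv_step_modify d (pvKey c) _
  rw [hbody]
  set C := pvGenCombA [] k with hC
  have hkeys : (C.foldl (fun d c => d.modify (pvKey c) [] (fun g => g ++ [c]))
      (PySem.Dict.empty : PySem.Dict (List (List Char)) (List (List Char)))).keys =
      PySem.Set.ofList (C.map pvKey) := by
    rw [PySem.Dict.keys_foldl_modify_key C pvKey [] (fun _ c g => g ++ [c]) PySem.Dict.empty]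
    rfl
  have hnd : (C.foldl (fun d c => d.modify (pvKey c) [] (fun g => g ++ [c]))
      (PySem.Dict.empty : PySem.Dict (List (List Char)) (List (List Char)))).keys.Nodup := by
    apply PySem.Dict.nodup_keys_foldl_modify_key C pvKey [] (fun _ c g => g ++ [c])
    simp [PySem.Dict.empty, PySem.Dict.keys]
  rw [PySem.Dict.values_eq_map_keys _ hnd [], hkeys]
  apply List.map_congr_left
  intro key hkey
  have : (C.foldl (fun d c => d.modify (pvKey c) [] (fun g => g ++ [c]))
      PySem.Dict.empty).getD key [] =
      ((C.map (fun c => (pvKey c, c))).foldl (fun d p => d.modify p.1 [] (fun g => g ++ [p.2]))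
      PySem.Dict.empty).getD key [] := by
    rw [List.foldl_map]
  rw [this, PySem.Dict.getD_foldl_modify_append]
  simp only [PySem.Dict.getD_empty, List.nil_append]
  rw [List.filter_map]
  simp [Function.comp_def, List.map_map]

theorem pv_firsts_update (l : List (List Char)) (acc : List (List (List Char))) :
    PySem.Set.update acc (l.map pvKey) = acc ++ (pvFirsts l acc).map pvKey := by
  induction l generalizing acc with
  | nil => simp [PySem.Set.update, pvFirsts]
  | cons c t ih =>
    simp only [List.map_cons, PySem.Set.update, List.foldl_cons, pvFirsts]
    by_cases h : pvKey c ∈ acc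
    · rw [if_pos h]
      have hadd : PySem.Set.add acc (pvKey c) = acc := by
        simp [PySem.Set.add, PySem.Set.contains, h]
      rw [hadd]
      exact ih acc
    · rw [if_neg h]
      have hadd : PySem.Set.add acc (pvKey c) = acc ++ [pvKey c] := by
        simp [PySem.Set.add, PySem.Set.contains, h]
      rw [hadd]
      have := ih (acc ++ [pvKey c])
      simp only [PySem.Set.update] at this
      rw [this]
      simp

theorem pv_firsts_subset (l : List (List Char)) (ks : List (List (List Char))) :
    ∀ s ∈ pvFirsts l ks, s ∈ l := by
  induction l generalizing ks with
  | nil => simp [pvFirsts]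
  | cons c t ih =>
    intro s hs
    simp only [pvFirsts] at hs
    by_cases h : pvKey c ∈ ks
    · rw [if_pos h] at hs; exact List.mem_cons_of_mem c (ih ks s hs)
    · rw [if_neg h] at hs
      rcases hs with _ | hs
      · exact List.mem_cons_self ..
      · exact List.mem_cons_of_mem c (ih _ s (by assumption))

theorem pv_scan_foldl (n : Int) (l : List (List Char)) (seen : PySem.Set (List Char))
    (res : List (List Int)) :
    (l.foldl
      (fun st s =>
        if PySem.Set.contains st.1 s then st
        else
          let orbit := PySem.List.sorted
            (PySem.Set.ofList ((PySem.List.pyRange 0 n 1).map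
              (fun j => PySem.List.slice s (some j) none ++ PySem.List.slice s none (some j))))
            (fun x => x)
          let seen := PySem.Set.update st.1 orbit
          if 1 < orbit.length then (seen, st.2 ++ [orbit.map pvBinToDecB]) else (seen, st.2))
      (seen, res)).2 = res ++ pvScan n l seen := by
  induction l generalizing seen res with
  | nil => simp [pvScan]
  | cons s t ih =>
    simp only [List.foldl_cons, pvScan]
    by_cases h : PySem.Set.contains seen s
    · rw [if_pos h]
      simp only [h, if_true]
      exact ih seen res
    · rw [if_neg h]
      simp only [h, Bool.false_eq_true, if_false]
      by_cases h2 : 1 < (PySem.List.sorted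
          (PySem.Set.ofList ((PySem.List.pyRange 0 n 1).map
            (fun j => PySem.List.slice s (some j) none ++ PySem.List.slice s none (some j))))
          (fun x => x)).length
      · simp only [h2, if_true]
        rw [ih]
        simp
      · simp only [h2, if_false]
        rw [ih]
        simp

theorem pv_scan_eq_out (k : Nat) (hk : 0 < k) (n : Int) (hn : (k : Int) = n)
    (l : List (List Char)) (hl : ∀ c ∈ l, c ∈ pvGenCombA [] k)
    (ks : List (List (List Char))) (seen : PySem.Set (List Char))
    (hinv : ∀ c ∈ l, (PySem.Set.contains seen c = true ↔ pvKey c ∈ ks)) :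
    pvScan n l seen = pvOut (pvFirsts l ks) := by
  induction l generalizing ks seen with
  | nil => simp [pvScan, pvFirsts, pvOut]
  | cons s t ih =>
    have hsC := hl s (List.mem_cons_self ..)
    have hsne : s ≠ [] := pv_mem_C_ne_nil k hk s hsC
    have hslen : (s.length : Int) = n := by
      obtain ⟨u, hu, hlen, -⟩ := (pv_genComb_mem k [] s).mp hsC
      rw [hu]; simpa [hlen]
    have horb : (PySem.List.pyRange 0 n 1).map
        (fun j => PySem.List.slice s (some j) none ++ PySem.List.slice s none (some j)) =
        pvRots s := pv_orbitB_eq s n hslen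
    simp only [pvScan, pvFirsts, horb]
    by_cases h : pvKey s ∈ ks
    · have hc : PySem.Set.contains seen s = true := (hinv s (List.mem_cons_self ..)).mpr h
      rw [if_pos hc, if_pos h]
      exact ih (fun c hc' => hl c (List.mem_cons_of_mem s hc'))
        ks seen (fun c hc' => hinv c (List.mem_cons_of_mem s hc'))
    · have hc : ¬ (PySem.Set.contains seen s = true) := fun hcc => h ((hinv s (List.mem_cons_self ..)).mp hcc)
      rw [if_neg hc, if_neg h]
      have hmem_orbit : ∀ c, c ∈ PySem.List.sorted (PySem.Set.ofList (pvRots s)) (fun x => x) ↔ c ~r s := by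
        intro c
        rw [PySem.List.mem_sorted, PySem.Set.mem_ofList, pv_mem_rots_iff s c hsne]
      have hrest := ih (fun c hc' => hl c (List.mem_cons_of_mem s hc'))
        (ks ++ [pvKey s]) (PySem.Set.update seen (PySem.List.sorted (PySem.Set.ofList (pvRots s)) (fun x => x)))
        (by
          intro c hct
          have hcC := hl c (List.mem_cons_of_mem s hct)
          have hcne : c ≠ [] := pv_mem_C_ne_nil k hk c hcC
          constructor
          · intro hcc
            have : c ∈ PySem.Set.update seen (PySem.List.sorted (PySem.Set.ofList (pvRots s)) (fun x => x)) := by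
              simpa [PySem.Set.contains] using hcc
            rw [PySem.Set.mem_update] at this
            rcases this with hcs | hco
            · have : PySem.Set.contains seen c = true := by simpa [PySem.Set.contains]
              rw [List.mem_append]
              exact Or.inl ((hinv c (List.mem_cons_of_mem s hct)).mp this)
            · rw [List.mem_append]
              exact Or.inr (by simp [(pv_key_eq_iff s c hsne hcne).mpr ((hmem_orbit c).mp hco)])
          · intro hks
            rw [List.mem_append] at hks
            have : c ∈ PySem.Set.update seen (PySem.List.sorted (PySem.Set.ofList (pvRots s)) (fun x => x)) := by
              rw [PySem.Set.mem_update]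
              rcases hks with hks | hks
              · left
                have : PySem.Set.contains seen c = true := (hinv c (List.mem_cons_of_mem s hct)).mpr hks
                simpa [PySem.Set.contains] using this
              · right
                rw [hmem_orbit c]
                exact (pv_key_eq_iff s c hsne hcne).mp (by simpa using hks)
            simpa [PySem.Set.contains] using this)
      rw [hrest]
      unfold pvOut pvG
      by_cases h2 : 1 < (PySem.List.sorted (PySem.Set.ofList (pvRots s)) (fun x => x)).length
      · simp only [List.filter_cons, h2, decide_true, if_true, List.map_cons]
        rfl
      · rw [if_neg h2]
        simp only [List.filter_cons]
        rw [show (decide (1 < (PySem.List.sorted (PySem.Set.ofList (pvRots s)) (fun x => x)).length)) = false from by simpa using h2]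
        simp

theorem pv_out_of_map (k : Nat) (hk : 0 < k) (L : List (List Char))
    (hL : ∀ s ∈ L, s ∈ pvGenCombA [] k) :
    (((L.map (fun s => (pvGenCombA [] k).filter (fun c => pvKey c == pvKey s))).filter
        (fun g => decide (1 < g.length))).map (fun g => g.map pvBinToDecA)) = pvOut L := by
  induction L with
  | nil => simp [pvOut]
  | cons s t ih =>
    have hhead := pv_filter_eq_pvG k hk s (hL s (List.mem_cons_self ..))
    have iht := ih (fun c hc => hL c (List.mem_cons_of_mem s hc))
    simp only [List.map_cons, List.filter_cons, hhead, pvOut] at *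
    by_cases h : 1 < (pvG s).length
    · simp [h, iht]
    · simp [h, iht]

theorem pv_A_eq_out (n : Int) (hn : 1 ≤ n) :
    generate_last_symmetry_group_decimal n = pvOut (pvFirsts (pvGenCombA [] n.toNat) []) := by
  have hk : 0 < n.toNat := by omega
  unfold generate_last_symmetry_group_decimal
  rw [PySem.List.pyRange_one_succ_right (by omega : (1:Int) ≤ n)]
  rw [List.foldl_append]
  simp only [List.foldl_cons, List.foldl_nil]
  rw [pv_grouped_values n.toNat]
  have hfn : (fun (acc : List (List Int)) (g : List (List Char)) =>
      if 1 < g.length then acc ++ [g.map pvBinToDecA] else acc) =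
      (fun acc g => if (fun (g : List (List Char)) => decide (1 < g.length)) g = true
        then acc ++ [(fun (g : List (List Char)) => g.map pvBinToDecA) g] else acc) := by
    funext acc g
    by_cases h : 1 < g.length <;> simp [h]
  rw [hfn, PySem.List.foldl_append_if, List.nil_append]
  have hkeys : PySem.Set.ofList ((pvGenCombA [] n.toNat).map pvKey) =
      (pvFirsts (pvGenCombA [] n.toNat) []).map pvKey := by
    have := pv_firsts_update (pvGenCombA [] n.toNat) []
    simpa [PySem.Set.ofList, PySem.Set.update, PySem.Set.empty] using this
  rw [hkeys, List.map_map]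
  simp only [Function.comp_def]
  exact pv_out_of_map n.toNat hk _ (pv_firsts_subset (pvGenCombA [] n.toNat) [])

theorem pv_B_eq_out (n : Int) (hn : 1 ≤ n) :
    generate_last_symmetry_group_decimal_alt n = pvOut (pvFirsts (pvGenCombA [] n.toNat) []) := by
  have hk : 0 < n.toNat := by omega
  have hnk : ((n.toNat : Int)) = n := Int.toNat_of_nonneg (by omega)
  unfold generate_last_symmetry_group_decimal_alt
  rw [show PySem.List.pyRange 0 n 1 = PySem.List.pyRange 0 ((n.toNat : Int)) 1 from by rw [hnk]]
  rw [pv_altStrings n.toNat, hnk, pv_scan_foldl, List.nil_append]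
  exact pv_scan_eq_out n.toNat hk n hnk _ (fun c hc => hc) [] PySem.Set.empty
    (by intro c hc; simp [PySem.Set.contains, PySem.Set.empty])

theorem pv_A_nonpos (n : Int) (hn : n ≤ 0) : generate_last_symmetry_group_decimal n = [] := by
  unfold generate_last_symmetry_group_decimal
  rw [PySem.List.pyRange_one_eq_nil (by omega : n + 1 ≤ 1)]
  rfl

theorem pv_B_nonpos (n : Int) (hn : n ≤ 0) : generate_last_symmetry_group_decimal_alt n = [] := by
  unfold generate_last_symmetry_group_decimal_alt
  rw [PySem.List.pyRange_one_eq_nil (by omega : n ≤ 0)]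
  rfl

-- ===== VERDICT (by name: the statement is the Claim_ definition above) =====
theorem generate_last_symmetry_group_decimal_spec : Claim_equal_generate_last_symmetry_group_decimal := by
  intro n _
  unfold Spec_generate_last_symmetry_group_decimal
  by_cases hn : n ≤ 0
  · rw [pv_A_nonpos n hn, pv_B_nonpos n hn]
  · rw [pv_A_eq_out n (by omega), pv_B_eq_out n (by omega)]
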